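-- pv_equiv track=rewrite | github.com/SviatoslavExpert/Python-for-beginners | lesson_11/additional task_1.py | find_one_permutation
-- ===== SOURCE A (Python) =====
-- def find_one_permutation(user_list,arrow):
--     max_index = None
--     arr = None
--     max_element = None
--     for i in range(len(user_list)):
--         if arrow[i] == 0 and i > 0 and user_list[i-1] < user_list[i] and (max_element is None or user_list[i] > max_element):
--             max_index = i
--             arr = arrow[i]
--             max_element = user_list[i]
--         if arrow[i] == 1 and i < len(user_list)-1 and user_list[i] > user_list[i+1] and (max_element is None or user_list[i] > max_element):
--             max_index = i
--             arr = arrow[i]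
--             max_element = user_list[i]
--     return (max_element,max_index,arr)
-- ===== SOURCE B (Python) =====
-- def find_one_permutation(user_list, arrow):
--     n = len(user_list)
--
--     def candidate(i):
--         if arrow[i] == 0 and i > 0 and user_list[i - 1] < user_list[i]:
--             return (user_list[i], i, arrow[i])
--         if arrow[i] == 1 and i < n - 1 and user_list[i] > user_list[i + 1]:
--             return (user_list[i], i, arrow[i])
--         return None
--
--     def best(lo, hi):
--         if hi <= lo:
--             return None
--         if hi - lo == 1:
--             return candidate(lo)
--         mid = (lo + hi) // 2
--         l = best(lo, mid)
--         r = best(mid, hi)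
--         if l is None:
--             return r
--         if r is None:
--             return l
--         return r if l[0] < r[0] else l
--
--     b = best(0, n)
--     return (None, None, None) if b is None else b
-- ===== Notes on version B (the rewrite author's own statement) =====
-- stated objective: alternative
-- what changed: Replaces A's left-to-right fold with three running accumulators by a divide-and-conquer tournament: the index range is split at the midpoint, each half recursively yields its best mobile candidate, and the two are merged preferring the larger value and the left half on ties.
import Mathlib
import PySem

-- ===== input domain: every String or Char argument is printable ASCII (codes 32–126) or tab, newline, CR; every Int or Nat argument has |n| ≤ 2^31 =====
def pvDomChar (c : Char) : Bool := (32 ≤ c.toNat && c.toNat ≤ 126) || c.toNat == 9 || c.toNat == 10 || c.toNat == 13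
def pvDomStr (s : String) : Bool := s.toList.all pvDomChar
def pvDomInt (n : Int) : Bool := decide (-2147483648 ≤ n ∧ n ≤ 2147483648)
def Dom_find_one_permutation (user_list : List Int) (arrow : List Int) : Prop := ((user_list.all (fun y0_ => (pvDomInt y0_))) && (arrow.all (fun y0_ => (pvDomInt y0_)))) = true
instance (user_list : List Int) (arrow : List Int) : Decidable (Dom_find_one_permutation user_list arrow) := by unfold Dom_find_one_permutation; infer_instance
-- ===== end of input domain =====

-- B replaces A's fused left-to-right accumulator loop with a divide-and-conquer tournament
-- over the index range (objective: alternative); same return value wherever A returns.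

-- ===== PORT A =====
-- A's loop body: two sequential ifs updating the state (max_index, arr, max_element).
-- arrow[i] / user_list[i±1] are in range under Pre_ and the ifs' earlier conjuncts; getD 0 is never the value used.
def pvStepA (user_list arrow : List Int) (n : Nat)
    (s : Option Int × Option Int × Option Int) (i : Nat) :
    Option Int × Option Int × Option Int :=
  let ai := arrow[i]?.getD 0
  let ui := user_list[i]?.getD 0
  let s :=
    if ai == 0 && decide (0 < i) && decide (user_list[i-1]?.getD 0 < ui) &&
       (s.2.2.isNone || decide (s.2.2.getD 0 < ui))
    then (some (i : Int), some ai, some ui) else s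
  if ai == 1 && decide (i < n - 1) && decide (user_list[i+1]?.getD 0 < ui) &&
     (s.2.2.isNone || decide (s.2.2.getD 0 < ui))
  then (some (i : Int), some ai, some ui) else s

def find_one_permutation (user_list : List Int) (arrow : List Int) : Option Int × Option Int × Option Int :=
  let n := user_list.length
  let st := (List.range n).foldl (pvStepA user_list arrow n) (none, none, none)
  (st.2.2, st.1, st.2.1)

-- ===== PORT B =====
-- B's helper candidate(i): the mobile candidate (user_list[i], i, arrow[i]) at index i, or None
def pvCand (user_list arrow : List Int) (n : Nat) (i : Nat) : Option (Int × Int × Int) :=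
  let ai := arrow[i]?.getD 0
  let ui := user_list[i]?.getD 0
  if ai == 0 && decide (0 < i) && decide (user_list[i-1]?.getD 0 < ui) then some (ui, (i : Int), ai)
  else if ai == 1 && decide (i < n - 1) && decide (user_list[i+1]?.getD 0 < ui) then some (ui, (i : Int), ai)
  else none

-- B's helper best(lo, hi): divide-and-conquer tournament on the index interval [lo, hi).
-- Python's (lo+hi)//2 on the non-negative ints lo, hi is Nat division (PySem.Int.floordiv_natCast).
def pvBest (user_list arrow : List Int) (n : Nat) (lo hi : Nat) : Option (Int × Int × Int) :=
  if hi ≤ lo then none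
  else if hi - lo = 1 then pvCand user_list arrow n lo
  else
    let mid := (lo + hi) / 2
    let l := pvBest user_list arrow n lo mid
    let r := pvBest user_list arrow n mid hi
    match l, r with
    | none, r => r
    | some lm, none => some lm
    | some lm, some rm => if lm.1 < rm.1 then some rm else some lm
termination_by hi - lo
decreasing_by all_goals omega

def find_one_permutation_alt (user_list : List Int) (arrow : List Int) : Option Int × Option Int × Option Int :=
  let n := user_list.length
  match pvBest user_list arrow n 0 n with
  | none => (none, none, none)
  | some c => (some c.1, some c.2.1, some c.2.2)

-- ===== PRECONDITION & SPEC =====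
-- Pre_ excludes exactly the inputs where Python A raises IndexError: arrow shorter than user_list.
def Pre_find_one_permutation (user_list : List Int) (arrow : List Int) : Prop :=
  user_list.length ≤ arrow.length
instance (user_list : List Int) (arrow : List Int) : Decidable (Pre_find_one_permutation user_list arrow) := by unfold Pre_find_one_permutation; infer_instance
def pvWitness_find_one_permutation : List Int × List Int := ([1, 2], [0, 0])

def Spec_find_one_permutation (user_list : List Int) (arrow : List Int) (out : Option Int × Option Int × Option Int) : Prop := out = find_one_permutation_alt user_list arrow
instance (user_list : List Int) (arrow : List Int) (out : Option Int × Option Int × Option Int) : Decidable (Spec_find_one_permutation user_list arrow out) := by unfold Spec_find_one_permutation; infer_instance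

-- ===== CLAIM (what is proved, stated in full; the proofs are below) =====
def Claim_equal_find_one_permutation : Prop := ∀ (user_list : List Int) (arrow : List Int), Dom_find_one_permutation user_list arrow → Pre_find_one_permutation user_list arrow → Spec_find_one_permutation user_list arrow (find_one_permutation user_list arrow)

-- ===== LEMMAS AND PROOFS =====

-- A's state as a function of the best candidate found so far
def pvRender : Option (Int × Int × Int) → Option Int × Option Int × Option Int
  | none => (none, none, none)
  | some c => (some c.2.1, some c.2.2, some c.1)

-- keep-earliest running max over candidates
def pvPick (acc : Option (Int × Int × Int)) (x : Int × Int × Int) : Option (Int × Int × Int) :=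
  match acc with
  | none => some x
  | some m => if m.1 < x.1 then some x else some m

-- the merge in pvBest, as a binary operation on optional candidates
def pvComb (b1 b2 : Option (Int × Int × Int)) : Option (Int × Int × Int) :=
  match b2 with
  | none => b1
  | some x => pvPick b1 x

def pvStepC (user_list arrow : List Int) (n : Nat)
    (acc : Option (Int × Int × Int)) (i : Nat) : Option (Int × Int × Int) :=
  match pvCand user_list arrow n i with
  | none => acc
  | some c => pvPick acc c

def pvBestOf (user_list arrow : List Int) (n : Nat) (idxs : List Nat) : Option (Int × Int × Int) :=
  idxs.foldl (pvStepC user_list arrow n) none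

theorem pvStepA_eq (user_list arrow : List Int) (n : Nat)
    (b : Option (Int × Int × Int)) (i : Nat) :
    pvStepA user_list arrow n (pvRender b) i =
      pvRender (pvStepC user_list arrow n b i) := by
  cases b with
  | none =>
    simp only [pvStepA, pvCand, pvStepC, pvRender, pvPick]
    split_ifs with h1 h2 h3 <;> simp_all
  | some m =>
    simp only [pvStepA, pvCand, pvStepC, pvRender, pvPick]
    split_ifs with h1 h2 h3 h4 h5 h6 h7 <;> simp_all <;>
      first
        | omega
        | rw [if_neg (by omega)]

theorem pvFoldA_eq (user_list arrow : List Int) (n : Nat)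
    (idxs : List Nat) (b : Option (Int × Int × Int)) :
    idxs.foldl (pvStepA user_list arrow n) (pvRender b) =
      pvRender (idxs.foldl (pvStepC user_list arrow n) b) := by
  induction idxs generalizing b with
  | nil => rfl
  | cons i t ih =>
    simp only [List.foldl_cons]
    rw [pvStepA_eq]
    exact ih _

theorem pvComb_assoc (b1 b2 b3 : Option (Int × Int × Int)) :
    pvComb (pvComb b1 b2) b3 = pvComb b1 (pvComb b2 b3) := by
  rcases b1 with _ | m1 <;> rcases b2 with _ | m2 <;> rcases b3 with _ | m3 <;>
    simp only [pvComb, pvPick] <;> try rfl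
  all_goals try split_ifs <;> rfl
  by_cases h12 : m1.1 < m2.1 <;> by_cases h23 : m2.1 < m3.1 <;>
    simp only [h12, h23, if_true, if_false] <;> split_ifs <;> first | rfl | omega

theorem pvFoldC_comb (user_list arrow : List Int) (n : Nat)
    (idxs : List Nat) (b : Option (Int × Int × Int)) :
    idxs.foldl (pvStepC user_list arrow n) b =
      pvComb b (pvBestOf user_list arrow n idxs) := by
  induction idxs generalizing b with
  | nil => cases b <;> rfl
  | cons i t ih =>
    simp only [pvBestOf, List.foldl_cons] at *
    rw [ih, ih (pvStepC user_list arrow n none i)]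
    have hstep : ∀ b', pvStepC user_list arrow n b' i = pvComb b' (pvStepC user_list arrow n none i) := by
      intro b'
      cases h : pvCand user_list arrow n i <;> cases b' <;>
        simp [pvStepC, pvComb, pvPick, h]
    rw [hstep b, ← pvComb_assoc]

theorem pvBestOf_append (user_list arrow : List Int) (n : Nat) (l1 l2 : List Nat) :
    pvBestOf user_list arrow n (l1 ++ l2) =
      pvComb (pvBestOf user_list arrow n l1) (pvBestOf user_list arrow n l2) := by
  simp only [pvBestOf, List.foldl_append]
  exact pvFoldC_comb user_list arrow n l2 _

theorem pvBest_eq (user_list arrow : List Int) (n : Nat) (lo hi : Nat) :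
    pvBest user_list arrow n lo hi =
      pvBestOf user_list arrow n (List.range' lo (hi - lo)) := by
  by_cases h : hi ≤ lo
  · rw [pvBest]
    simp [h, Nat.sub_eq_zero_of_le h, pvBestOf]
  · by_cases h1 : hi - lo = 1
    · rw [pvBest]
      simp only [h, if_false, h1, if_true]
      cases hc : pvCand user_list arrow n lo <;>
        simp [pvBestOf, List.range', pvStepC, pvPick, hc]
    · rw [pvBest]
      simp only [h, if_false, h1, if_false]
      have hmid1 : lo < (lo + hi) / 2 := by omega
      have hmid2 : (lo + hi) / 2 < hi := by omega
      have hsplit : List.range' lo (hi - lo) =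
          List.range' lo ((lo + hi) / 2 - lo) ++ List.range' ((lo + hi) / 2) (hi - (lo + hi) / 2) := by
        have e1 : hi - lo = ((lo + hi) / 2 - lo) + (hi - (lo + hi) / 2) := by omega
        rw [e1, ← List.range'_append]
        congr 2
        omega
      rw [hsplit, pvBestOf_append,
        pvBest_eq user_list arrow n lo ((lo + hi) / 2),
        pvBest_eq user_list arrow n ((lo + hi) / 2) hi]
      cases pvBestOf user_list arrow n (List.range' lo ((lo + hi) / 2 - lo)) <;>
        cases pvBestOf user_list arrow n (List.range' ((lo + hi) / 2) (hi - (lo + hi) / 2)) <;>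
        simp [pvComb, pvPick]
termination_by hi - lo
decreasing_by all_goals omega

theorem pv_main (user_list arrow : List Int) :
    find_one_permutation user_list arrow = find_one_permutation_alt user_list arrow := by
  show (((List.range user_list.length).foldl (pvStepA user_list arrow user_list.length) (none, none, none)).2.2,
        ((List.range user_list.length).foldl (pvStepA user_list arrow user_list.length) (none, none, none)).1,
        ((List.range user_list.length).foldl (pvStepA user_list arrow user_list.length) (none, none, none)).2.1) =
      (match pvBest user_list arrow user_list.length 0 user_list.length with
       | none => ((none : Option Int), (none : Option Int), (none : Option Int))
       | some c => (some c.1, some c.2.1, some c.2.2))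
  rw [pvBest_eq]
  have hr : List.range' 0 (user_list.length - 0) = List.range user_list.length := by
    simp [List.range_eq_range']
  rw [hr]
  have h := pvFoldA_eq user_list arrow user_list.length (List.range user_list.length) none
  simp only [pvRender] at h
  rw [h]
  simp only [pvBestOf]
  cases (List.range user_list.length).foldl (pvStepC user_list arrow user_list.length) none with
  | none => rfl
  | some c => rfl

-- ===== VERDICT (by name: the statement is the Claim_ definition above) =====
theorem find_one_permutation_spec : Claim_equal_find_one_permutation := by
  intro user_list arrow _ _
  unfold Spec_find_one_permutation
  exact pv_main user_list arrow
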